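-- pv_equiv track=rewrite | github.com/muelerse/GeoMetaMorph | evaluator.py | _transform_type
-- ===== SOURCE A (Python) =====
-- def _transform_type(key: str) -> str | None:
--     """
--     Extract the transformation name from a signature key, or returns None if the key does not contain a recognized
--     transformation name. (The transform name is the underscore-separated segment that begins with Scale, Translate,
--     Rotate, or Mirror.)
--     """
--     for t in ("Scale", "Translate", "Rotate", "Mirror"):
--         if t in key:
--             segment = next(
--                 (part for part in key.split("_") if part.startswith(t)),
--                 None,
--             )
--             if segment:
--                 # Strip parameter portion to get the bare transform name
--                 return segment.split("(")[0]
--     return None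
-- ===== SOURCE B (Python) =====
-- _TRANSFORMS = ("Scale", "Translate", "Rotate", "Mirror")
--
--
-- def _transform_type(key: str):
--     # Single pass over the key's parts, tracking the lowest-priority-rank
--     # transform prefix seen so far (earliest part wins ties for a rank).
--     best_rank = len(_TRANSFORMS)
--     best = None
--     for part in key.split("_"):
--         for rank, t in enumerate(_TRANSFORMS):
--             if rank < best_rank and part.startswith(t):
--                 best_rank = rank
--                 best = part.split("(")[0]
--                 break
--     return best
-- ===== Notes on version B (the rewrite author's own statement) =====
-- stated objective: alternative
-- what changed: A scans the key's parts up to four times (once per transform name, each guarded by a substring test); B splits once and makes a single pass over the parts, tracking the lowest-priority-rank prefix match seen so far (earliest part wins ties), returning the tracked name at the end.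
import Mathlib
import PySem

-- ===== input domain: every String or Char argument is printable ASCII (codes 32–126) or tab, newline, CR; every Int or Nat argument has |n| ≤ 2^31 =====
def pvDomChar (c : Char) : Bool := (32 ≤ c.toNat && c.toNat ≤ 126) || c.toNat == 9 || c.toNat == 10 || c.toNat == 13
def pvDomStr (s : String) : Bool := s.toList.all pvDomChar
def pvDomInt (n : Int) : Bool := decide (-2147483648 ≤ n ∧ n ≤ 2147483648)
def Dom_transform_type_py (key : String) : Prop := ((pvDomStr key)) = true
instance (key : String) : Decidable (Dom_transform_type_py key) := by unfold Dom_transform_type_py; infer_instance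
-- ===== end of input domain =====

-- B replaces A's four scans of the parts (one per transform name, each guarded by a
-- substring test) with a single pass over the parts tracking the best-ranked prefix
-- match seen so far; objective: alternative decomposition.

-- ===== PORT A =====
-- s.split("(")[0] / s.split("_"): split? with a nonempty literal separator is always
-- `some`, and Python's split never returns an empty list, so getD/headD are exact here.
def pyParen0 (s : String) : String := ((PySem.Str.split? s "(").getD []).headD ""

def transformTypeLoop : List String → String → Option String
  | [], _ => none
  | t :: ts, key =>
    if PySem.Str.isIn t key = true then
      match ((PySem.Str.split? key "_").getD []).find? (fun part => PySem.Str.startswith part t) with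
      | some segment =>
        if segment = "" then transformTypeLoop ts key else some (pyParen0 segment)
      | none => transformTypeLoop ts key
    else transformTypeLoop ts key

def transform_type_py (key : String) : Option String :=
  transformTypeLoop ["Scale", "Translate", "Rotate", "Mirror"] key

-- ===== PORT B =====
-- enumerate(_TRANSFORMS) as a literal list
def altTransformsEnum : List (Nat × String) :=
  [(0, "Scale"), (1, "Translate"), (2, "Rotate"), (3, "Mirror")]

def altInner : List (Nat × String) → String → Nat → Option String → Nat × Option String
  | [], _, bestRank, best => (bestRank, best)
  | (rank, t) :: rest, part, bestRank, best =>
    if rank < bestRank ∧ PySem.Str.startswith part t = true then (rank, some (pyParen0 part))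
    else altInner rest part bestRank best

def altOuter : List String → Nat → Option String → Nat × Option String
  | [], bestRank, best => (bestRank, best)
  | part :: parts, bestRank, best =>
    let st := altInner altTransformsEnum part bestRank best
    altOuter parts st.1 st.2

def transform_type_py_alt (key : String) : Option String :=
  (altOuter ((PySem.Str.split? key "_").getD []) 4 none).2

-- ===== PRECONDITION & SPEC =====
def Spec_transform_type_py (key : String) (out : Option String) : Prop := out = transform_type_py_alt key
instance (key : String) (out : Option String) : Decidable (Spec_transform_type_py key out) := by unfold Spec_transform_type_py; infer_instance

-- ===== CLAIM (what is proved, stated in full; the proofs are below) =====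
def Claim_equal_transform_type_py : Prop := ∀ (key : String), Dom_transform_type_py key → Spec_transform_type_py key (transform_type_py key)

-- ===== LEMMAS AND PROOFS =====

-- Every piece produced by Python's str.split is a contiguous chunk of the original string.
lemma splitOn_go_infix (sep : List Char) :
    ∀ (fuel : Nat) (l cur : List Char) (acc : List (List Char)) (s : List Char),
      (cur.reverse ++ l) <:+ s → (∀ q ∈ acc, q <:+: s) →
      ∀ piece ∈ PySem.Chars.splitOn.go sep fuel l cur acc, piece <:+: s := by
  intro fuel
  induction fuel with
  | zero =>
    intro l cur acc s hsuf hacc piece hmem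
    rw [PySem.Chars.splitOn.go.eq_def] at hmem
    simp only [List.mem_reverse, List.mem_cons] at hmem
    rcases hmem with h | h
    · subst h; exact hsuf.isInfix
    · exact hacc piece h
  | succ n ih =>
    intro l cur acc s hsuf hacc piece hmem
    cases l with
    | nil =>
      rw [PySem.Chars.splitOn.go.eq_def] at hmem
      simp only [List.mem_reverse, List.mem_cons] at hmem
      rcases hmem with h | h
      · subst h
        have hsuf' : cur.reverse <:+ s := by simpa using hsuf
        exact hsuf'.isInfix
      · exact hacc piece h
    | cons c rest =>
      rw [PySem.Chars.splitOn.go.eq_def] at hmem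
      by_cases hp : sep.isPrefixOf (c :: rest) = true
      · simp only [hp, if_true] at hmem
        refine ih _ _ _ s ?_ ?_ piece hmem
        · have h1 : (c :: rest) <:+ s := (List.suffix_append cur.reverse (c :: rest)).trans hsuf
          have h2 : List.drop sep.length (c :: rest) <:+ (c :: rest) := List.drop_suffix _ _
          simpa using h2.trans h1
        · intro q hq
          rcases List.mem_cons.mp hq with hq | hq
          · subst hq
            obtain ⟨u, hu⟩ := hsuf
            exact ⟨u, c :: rest, by simpa [List.append_assoc] using hu⟩
          · exact hacc q hq
      · simp only [hp] at hmem
        refine ih _ _ _ s ?_ hacc piece hmem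
        simpa [List.append_assoc] using hsuf

lemma mem_splitOn_infix (cs sep piece : List Char)
    (h : piece ∈ PySem.Chars.splitOn cs sep) : piece <:+: cs := by
  refine splitOn_go_infix sep (cs.length + 1) cs [] [] cs (by simp) (by simp) piece ?_
  simpa [PySem.Chars.splitOn] using h

-- One iteration of A's outer loop: the `t in key` guard and the truthiness test are
-- both implied by a successful startswith-search among the parts.
lemma stepA (key t : String) (ht : t.toList ≠ []) (rest : Option String) :
    (if PySem.Str.isIn t key = true then
      match ((PySem.Str.split? key "_").getD []).find? (fun part => PySem.Str.startswith part t) with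
      | some segment => if segment = "" then rest else some (pyParen0 segment)
      | none => rest
    else rest) =
      match ((PySem.Str.split? key "_").getD []).find? (fun part => PySem.Str.startswith part t) with
      | some segment => some (pyParen0 segment)
      | none => rest := by
  cases hf : ((PySem.Str.split? key "_").getD []).find? (fun part => PySem.Str.startswith part t) with
  | none => simp
  | some seg =>
    have hpred : PySem.Str.startswith seg t = true := by simpa using List.find?_some hf
    have hmem : seg ∈ ((PySem.Str.split? key "_").getD []) := List.mem_of_find?_eq_some hf
    have hparts : ((PySem.Str.split? key "_").getD []) =
        (PySem.Chars.splitOn key.toList ['_']).map (fun cs => String.ofList cs) := by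
      simp [PySem.Str.split?, PySem.Chars.split?]
    rw [hparts] at hmem
    obtain ⟨piece, hpiece, hseg⟩ := List.mem_map.mp hmem
    have hsegl : seg.toList = piece := by rw [← hseg]; simp
    have hpre : t.toList <+: piece := by
      have h1 := (PySem.Chars.startswith_iff seg.toList t.toList).mp
        (by rw [← PySem.Str.startswith_eq]; exact hpred)
      rwa [hsegl] at h1
    have hinf : t.toList <:+: key.toList :=
      hpre.isInfix.trans (mem_splitOn_infix key.toList ['_'] piece hpiece)
    have hin : PySem.Chars.isIn t.toList key.toList = true := by
      have h2 : PySem.Str.isIn t key = true := (PySem.Str.isIn_iff_infix t key).mpr hinf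
      simpa using h2
    have hne' : seg ≠ "" := by
      intro hcon
      rw [hcon] at hsegl
      have : piece = [] := hsegl.symm
      rw [this] at hpre
      exact ht (List.prefix_nil.mp hpre)
    simp [hin, hne']

-- first (rank, part) by rank order: scan the ranked names, for each the first matching part
def pvFfind : List (Nat × String) → List String → Option (Nat × String)
  | [], _ => none
  | (r, t) :: rest, ps =>
    match ps.find? (fun p => PySem.Str.startswith p t) with
    | some p => some (r, p)
    | none => pvFfind rest ps

def pvRank? (p : String) : Option Nat :=
  (altTransformsEnum.find? (fun rt => PySem.Str.startswith p rt.2)).map (·.1)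

-- first (rank, part) by part order with strict-threshold improvement (B's shape)
def pvBest : List String → Nat → Option (Nat × String)
  | [], _ => none
  | p :: ps, br =>
    match pvRank? p with
    | some r =>
      if r < br then
        match pvBest ps r with
        | some x => some x
        | none => some (r, p)
      else pvBest ps br
    | none => pvBest ps br

lemma pvFfind_nil : ∀ (L : List (Nat × String)), pvFfind L [] = none := by
  intro L
  induction L with
  | nil => rfl
  | cons a rest ih => obtain ⟨r, t⟩ := a; simp [pvFfind, List.find?, ih]

lemma loopA_char (L : List (Nat × String)) (key : String)
    (hne : ∀ rt ∈ L, (rt.2 : String).toList ≠ []) :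
    transformTypeLoop (L.map (·.2)) key =
      (pvFfind L ((PySem.Str.split? key "_").getD [])).map (fun x => pyParen0 x.2) := by
  induction L with
  | nil => simp [transformTypeLoop, pvFfind]
  | cons a L' ih =>
    obtain ⟨r, t⟩ := a
    simp only [List.map_cons]
    rw [transformTypeLoop]
    rw [stepA key t (hne (r, t) (by simp)) _]
    cases hf : ((PySem.Str.split? key "_").getD []).find? (fun part => PySem.Str.startswith part t) with
    | some seg => simp only [pvFfind, hf, Option.map_some]
    | none =>
      simp only [pvFfind, hf]
      exact ih (fun rt h => hne rt (by simp [h]))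

lemma inner_char (p : String) (br : Nat) (best : Option String) :
    altInner altTransformsEnum p br best =
      match pvRank? p with
      | some r => if r < br then (r, some (pyParen0 p)) else (br, best)
      | none => (br, best) := by
  cases hS : PySem.Str.startswith p "Scale" <;>
  cases hT : PySem.Str.startswith p "Translate" <;>
  cases hR : PySem.Str.startswith p "Rotate" <;>
  cases hM : PySem.Str.startswith p "Mirror" <;>
    simp only [altInner, altTransformsEnum, pvRank?, List.find?, hS, hT, hR, hM,
      and_true, and_false, if_false, Option.map_some, Option.map_none,
      Bool.false_eq_true] <;>
    (split_ifs <;> first | rfl | omega)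

lemma outer_char : ∀ (ps : List String) (br : Nat) (best : Option String),
    altOuter ps br best =
      match pvBest ps br with
      | some x => (x.1, some (pyParen0 x.2))
      | none => (br, best) := by
  intro ps
  induction ps with
  | nil => intro br best; simp [altOuter, pvBest]
  | cons p ps ih =>
    intro br best
    simp only [altOuter]
    rw [inner_char]
    cases hr : pvRank? p with
    | none =>
      simp only [hr]
      rw [ih]
      simp [pvBest, hr]
    | some r =>
      simp only [hr]
      by_cases h : r < br
      · rw [if_pos h, ih]
        cases hb : pvBest ps r <;> simp [pvBest, hr, h, hb]
      · rw [if_neg h, ih]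
        simp [pvBest, hr, h]

-- peeling one part off the part list, for rank-sorted ranked-name lists
lemma pvFfind_cons_parts : ∀ (L : List (Nat × String)) (p : String) (ps : List String),
    L.Pairwise (fun a b => a.1 < b.1) →
    pvFfind L (p :: ps) =
      match L.find? (fun rt => PySem.Str.startswith p rt.2) with
      | none => pvFfind L ps
      | some rt =>
        match pvFfind (L.takeWhile (fun rt' => decide (rt'.1 < rt.1))) ps with
        | some x => some x
        | none => some (rt.1, p) := by
  intro L
  induction L with
  | nil => intro p ps _; simp [pvFfind]
  | cons a L' ih =>
    obtain ⟨r0, t0⟩ := a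
    intro p ps hPW
    have hPW' : L'.Pairwise (fun a b => a.1 < b.1) := hPW.of_cons
    have hlt : ∀ b ∈ L', r0 < b.1 := (List.pairwise_cons.mp hPW).1
    cases h0 : PySem.Str.startswith p t0 with
    | true =>
      have htw : (((r0, t0) :: L').takeWhile (fun rt' => decide (rt'.1 < r0))) = [] := by
        simp [List.takeWhile]
      simp only [pvFfind, List.find?, h0, htw]
    | false =>
      cases hq : ps.find? (fun q => PySem.Str.startswith q t0) with
      | some q =>
        cases hE' : L'.find? (fun rt => PySem.Str.startswith p rt.2) with
        | none => simp only [pvFfind, List.find?, h0, hq, hE']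
        | some rt =>
          have hr : r0 < rt.1 := hlt rt (List.mem_of_find?_eq_some hE')
          have htw : (((r0, t0) :: L').takeWhile (fun rt' => decide (rt'.1 < rt.1))) =
              (r0, t0) :: L'.takeWhile (fun rt' => decide (rt'.1 < rt.1)) := by
            simp [List.takeWhile, hr]
          simp only [pvFfind, List.find?, h0, hq, hE', htw]
      | none =>
        have hrec := ih p ps hPW'
        cases hE' : L'.find? (fun rt => PySem.Str.startswith p rt.2) with
        | none =>
          rw [hE'] at hrec
          simp only [pvFfind, List.find?, h0, hq, hE', hrec]
        | some rt =>
          have hr : r0 < rt.1 := hlt rt (List.mem_of_find?_eq_some hE')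
          have htw : (((r0, t0) :: L').takeWhile (fun rt' => decide (rt'.1 < rt.1))) =
              (r0, t0) :: L'.takeWhile (fun rt' => decide (rt'.1 < rt.1)) := by
            simp [List.takeWhile, hr]
          rw [hE'] at hrec
          simp only [pvFfind, List.find?, h0, hq, hE', htw, hrec]

lemma takeWhileE (br : Nat) :
    altTransformsEnum.takeWhile (fun rt => decide (rt.1 < br)) = altTransformsEnum.take br := by
  rcases br with _ | _ | _ | _ | n
  · rfl
  · rfl
  · rfl
  · rfl
  · have e : ∀ k : Nat, k < 4 → decide (k < n + 1 + 1 + 1 + 1) = true :=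
      fun k hk => decide_eq_true (by omega)
    simp [altTransformsEnum, List.takeWhile, List.take]

lemma findE (p : String) (br : Nat) :
    (altTransformsEnum.take br).find? (fun rt => PySem.Str.startswith p rt.2) =
      match altTransformsEnum.find? (fun rt => PySem.Str.startswith p rt.2) with
      | some rt => if rt.1 < br then some rt else none
      | none => none := by
  rcases br with _ | _ | _ | _ | n <;>
  cases hS : PySem.Str.startswith p "Scale" <;>
  cases hT : PySem.Str.startswith p "Translate" <;>
  cases hR : PySem.Str.startswith p "Rotate" <;>
  cases hM : PySem.Str.startswith p "Mirror" <;>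
    simp only [altTransformsEnum, List.find?, List.take, List.take_nil, hS, hT, hR, hM] <;>
    first | rfl | (split_ifs <;> first | rfl | omega)

lemma takeWhile_take (r br : Nat) (h : r ≤ br) :
    (altTransformsEnum.take br).takeWhile (fun rt => decide (rt.1 < r)) =
      altTransformsEnum.takeWhile (fun rt => decide (rt.1 < r)) := by
  rw [← takeWhileE br, List.takeWhile_takeWhile]
  congr 1
  funext rt
  by_cases hr : rt.1 < r <;> simp [hr] <;> omega

-- part-major scanning with a rank threshold = rank-major scanning of the names below the threshold
lemma best_eq_ffind : ∀ (ps : List String) (br : Nat),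
    pvBest ps br = pvFfind (altTransformsEnum.take br) ps := by
  intro ps
  induction ps with
  | nil => intro br; simp [pvBest, pvFfind_nil]
  | cons p ps ih =>
    intro br
    have hPW : (altTransformsEnum.take br).Pairwise (fun a b => a.1 < b.1) :=
      List.Pairwise.sublist (List.take_sublist _ _) (by decide)
    rw [pvFfind_cons_parts _ p ps hPW, findE]
    cases hE : altTransformsEnum.find? (fun rt => PySem.Str.startswith p rt.2) with
    | none =>
      have hrk : pvRank? p = none := by simp only [pvRank?, hE, Option.map_none]
      simp only [pvBest, hrk]
      rw [ih]
    | some rt =>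
      obtain ⟨r, t⟩ := rt
      have hrk : pvRank? p = some r := by simp only [pvRank?, hE, Option.map_some]
      by_cases h : r < br
      · simp only [if_pos h]
        rw [takeWhile_take r br (le_of_lt h), takeWhileE]
        simp only [pvBest, hrk, if_pos h]
        rw [ih]
      · simp only [if_neg h]
        simp only [pvBest, hrk, if_neg h]
        rw [ih]

-- ===== VERDICT (by name: the statement is the Claim_ definition above) =====
theorem transform_type_py_spec : Claim_equal_transform_type_py := by
  intro key _
  unfold Spec_transform_type_py
  have hA : transform_type_py key =
      (pvFfind altTransformsEnum ((PySem.Str.split? key "_").getD [])).map (fun x => pyParen0 x.2) := by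
    have h := loopA_char altTransformsEnum key (by decide)
    simpa [altTransformsEnum, transform_type_py] using h
  have hB : transform_type_py_alt key =
      (pvBest ((PySem.Str.split? key "_").getD []) 4).map (fun x => pyParen0 x.2) := by
    unfold transform_type_py_alt
    rw [outer_char]
    cases pvBest ((PySem.Str.split? key "_").getD []) 4 <;> simp
  rw [hA, hB, best_eq_ffind]
  rfl
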